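-- pv_equiv track=rewrite | github.com/tomascony99/UCEMA | 09-clasificacion/01_peceptron_logit/perceptron_algo.py | algoritmo_clasificacion
-- ===== SOURCE A (Python) =====
-- def algoritmo_clasificacion(sentence):
--     sentence = sentence.replace('!', '').replace(',', '').lower() #elimino caracteres especiales y convierto a minúsculas
--     score = 0
--     for word in sentence.split(): #recorro la oración
--         if word == 'aack':
--             score += 1
--         elif word == 'beep':
--             score -= 1
--     return score
-- ===== SOURCE B (Python) =====
-- def algoritmo_clasificacion(sentence):
--     def val(word):
--         if word == 'aack':
--             return 1
--         if word == 'beep':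
--             return -1
--         return 0
--     score = 0
--     cur = ''
--     for ch in sentence:
--         if ch in '!,':
--             continue
--         ch = ch.lower()
--         if ch.isspace():
--             score += val(cur)
--             cur = ''
--         else:
--             cur = cur + ch
--     return score + val(cur)
-- ===== Notes on version B (the rewrite author's own statement) =====
-- stated objective: alternative
-- what changed: Replaces A's string pipeline (two .replace passes, .lower, .split, then a word-scoring loop) with a single character-level state machine: one pass over the raw characters that skips the two punctuation characters A deletes, lowercases each character, and scores a word each time whitespace (or the end of input) closes it.
import Mathlib
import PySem

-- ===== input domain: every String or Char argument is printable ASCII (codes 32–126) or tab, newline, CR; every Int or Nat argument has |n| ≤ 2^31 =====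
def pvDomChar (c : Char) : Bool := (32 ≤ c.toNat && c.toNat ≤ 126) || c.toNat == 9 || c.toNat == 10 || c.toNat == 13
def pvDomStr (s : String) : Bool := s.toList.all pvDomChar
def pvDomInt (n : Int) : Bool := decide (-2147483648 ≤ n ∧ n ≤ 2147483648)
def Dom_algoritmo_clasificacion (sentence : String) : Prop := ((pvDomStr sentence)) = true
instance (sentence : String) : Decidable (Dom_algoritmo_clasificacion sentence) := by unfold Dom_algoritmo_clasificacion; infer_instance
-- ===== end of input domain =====

-- B replaces A's string pipeline (replace/replace/lower/split + word loop) by a single character-level state machine: an alternative decomposition, same cost.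


-- ===== PORT A =====
def algoritmo_clasificacion (sentence : String) : Int :=
  let sentence := PySem.Str.lower (PySem.Str.replace (PySem.Str.replace sentence "!" "") "," "")
  (PySem.Str.split₀ sentence).foldl
    (fun score word =>
      if word == "aack" then score + 1
      else if word == "beep" then score - 1
      else score) 0

-- ===== PORT B =====
-- B: one pass over the raw characters; skip '!'/','; lowercase each char; whitespace (or end) closes and scores the current word.
def pvValB (word : String) : Int :=
  if word == "aack" then 1
  else if word == "beep" then -1
  else 0

def pvGoB : List Char → List Char → Int → Int
  | [], cur, score => score + pvValB (String.ofList cur)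
  | c :: cs, cur, score =>
    if c == '!' || c == ',' then pvGoB cs cur score
    else
      let c' := PySem.Chars.lowerChar c
      if PySem.Chars.isspace c' then pvGoB cs [] (score + pvValB (String.ofList cur))
      else pvGoB cs (cur ++ [c']) score

def algoritmo_clasificacion_alt (sentence : String) : Int :=
  pvGoB sentence.toList [] 0

-- ===== PRECONDITION & SPEC =====
def Spec_algoritmo_clasificacion (sentence : String) (out : Int) : Prop := out = algoritmo_clasificacion_alt sentence
instance (sentence : String) (out : Int) : Decidable (Spec_algoritmo_clasificacion sentence out) := by unfold Spec_algoritmo_clasificacion; infer_instance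

-- ===== CLAIM (what is proved, stated in full; the proofs are below) =====
def Claim_equal_algoritmo_clasificacion : Prop := ∀ (sentence : String), Dom_algoritmo_clasificacion sentence → Spec_algoritmo_clasificacion sentence (algoritmo_clasificacion sentence)

-- ===== LEMMAS AND PROOFS =====

-- the cleaning A performs, at the character level: drop '!' and ',', then lowercase
def pvClean (cs : List Char) : List Char :=
  (cs.filter (fun c => !(c == '!' || c == ','))).map PySem.Chars.lowerChar

-- total score of a list of words (as char lists)
def pvS (ws : List (List Char)) : Int :=
  (ws.map (fun w => pvValB (String.ofList w))).sum

lemma replace_single_del (c : Char) (l acc : List Char) (fuel : Nat) (h : l.length ≤ fuel) :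
    PySem.Chars.replace.go [c] [] fuel l acc = acc.reverse ++ l.filter (fun x => !(x == c)) := by
  induction l generalizing fuel acc with
  | nil => cases fuel <;> simp [PySem.Chars.replace.go]
  | cons x t ih =>
    cases fuel with
    | zero => simp at h
    | succ n =>
      simp only [List.length_cons, Nat.add_le_add_iff_right] at h
      by_cases hx : x = c
      · subst hx
        simp only [PySem.Chars.replace.go, List.isPrefixOf, BEq.rfl, Bool.true_and,
          if_pos, List.length_cons, List.drop_succ_cons,
          List.length_nil, List.drop_zero, List.reverse_nil, List.nil_append]
        rw [ih _ _ h]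
        simp
      · have hbe : ([c].isPrefixOf (x :: t)) = false := by
          simp [List.isPrefixOf]
          exact fun hh => hx hh.symm
        simp only [PySem.Chars.replace.go, hbe, if_neg, Bool.false_eq_true, not_false_iff]
        rw [ih _ _ h]
        simp [hx]

lemma replace_toList (s : String) (c : Char) :
    (PySem.Str.replace s (String.ofList [c]) "").toList = s.toList.filter (fun x => !(x == c)) := by
  have : (String.ofList [c]).toList = [c] := by simp
  simp only [PySem.Str.toList_replace, this, PySem.Chars.replace, List.isEmpty_cons,
    Bool.false_eq_true, if_false, String.toList_empty]
  rw [replace_single_del c s.toList [] _ le_rfl]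
  simp

lemma foldl_score_eq (l : List String) (a : Int) :
    l.foldl (fun score word =>
      if word == "aack" then score + 1
      else if word == "beep" then score - 1
      else score) a
    = a + (l.map pvValB).sum := by
  induction l generalizing a with
  | nil => simp
  | cons x xs ih =>
    simp only [List.foldl_cons, ih, pvValB, List.map_cons, List.sum_cons]
    by_cases h1 : x = "aack"
    · simp [h1]; ring
    · by_cases h2 : x = "beep"
      · simp [h1, h2]; ring
      · simp [h1, h2]

lemma pvValB_empty : pvValB "" = 0 := by decide

lemma pvValB_ofList_nil : pvValB (String.ofList []) = 0 := by decide

lemma pvGoB_split (cs : List Char) : ∀ (cur : List Char) (acc : List (List Char)) (score : Int),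
    pvGoB cs cur score
      = score + pvS (PySem.Chars.split₀.go (pvClean cs) cur.reverse acc) - pvS acc := by
  induction cs with
  | nil =>
    intro cur acc score
    by_cases hc : cur = []
    · subst hc
      simp [pvGoB, pvClean, PySem.Chars.split₀.go, pvS, pvValB_empty,
        List.map_reverse]
    · have hne : cur.reverse.isEmpty = false := by
        simp [hc]
      simp [pvGoB, pvClean, PySem.Chars.split₀.go, hne, pvS, List.map_reverse]
      ring
  | cons c t ih =>
    intro cur acc score
    by_cases hsk : (c == '!' || c == ',') = true
    · have hdrop : (!(c == '!') && !(c == ',')) = false := by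
        cases h1 : (c == '!') <;> cases h2 : (c == ',') <;> simp_all
      have hcl : pvClean (c :: t) = pvClean t := by
        simp [pvClean, hdrop]
      rw [show pvGoB (c :: t) cur score = pvGoB t cur score by simp [pvGoB, hsk], hcl, ih]
    · have hcl : pvClean (c :: t) = PySem.Chars.lowerChar c :: pvClean t := by
        simp only [pvClean, List.filter_cons, hsk]
        simp
      by_cases hsp : PySem.Chars.isspace (PySem.Chars.lowerChar c) = true
      · rw [show pvGoB (c :: t) cur score
              = pvGoB t [] (score + pvValB (String.ofList cur)) by
            simp [pvGoB, hsk, hsp]]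
        by_cases hc : cur = []
        · subst hc
          have hgo : PySem.Chars.split₀.go (pvClean (c :: t)) ([] : List Char).reverse acc
              = PySem.Chars.split₀.go (pvClean t) [] acc := by
            simp [hcl, PySem.Chars.split₀.go, hsp]
          rw [hgo, ih [] acc _]
          simp only [List.reverse_nil, pvValB_ofList_nil]
          ring
        · have hne : cur.reverse.isEmpty = false := by simp [hc]
          have hgo : PySem.Chars.split₀.go (pvClean (c :: t)) cur.reverse acc
              = PySem.Chars.split₀.go (pvClean t) [] (cur :: acc) := by
            simp [hcl, PySem.Chars.split₀.go, hsp, hne]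
          rw [hgo, ih [] (cur :: acc) _]
          simp only [List.reverse_nil, pvS, List.map_cons, List.sum_cons]
          ring
      · rw [show pvGoB (c :: t) cur score
              = pvGoB t (cur ++ [PySem.Chars.lowerChar c]) score by
            simp [pvGoB, hsk, hsp]]
        have hgo : PySem.Chars.split₀.go (pvClean (c :: t)) cur.reverse acc
            = PySem.Chars.split₀.go (pvClean t) (cur ++ [PySem.Chars.lowerChar c]).reverse acc := by
          simp [hcl, PySem.Chars.split₀.go, hsp]
        rw [hgo, ih]

lemma cleaned_toList (s : String) :
    (PySem.Str.lower (PySem.Str.replace (PySem.Str.replace s "!" "") "," "")).toList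
      = pvClean s.toList := by
  have h1 : (PySem.Str.replace s "!" "").toList = s.toList.filter (fun x => !(x == '!')) :=
    replace_toList s '!'
  have h2 : (PySem.Str.replace (PySem.Str.replace s "!" "") "," "").toList
      = (s.toList.filter (fun x => !(x == '!'))).filter (fun x => !(x == ',')) := by
    have := replace_toList (PySem.Str.replace s "!" "") ','
    rw [h1] at this
    exact this
  rw [PySem.Str.toList_lower, h2, PySem.Chars.lower, pvClean, List.filter_filter]
  exact congrArg (List.map PySem.Chars.lowerChar)
    (List.filter_congr (fun x _ => by
      cases hx : (x == '!') <;> cases hy : (x == ',') <;> simp [hx, hy]))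

-- ===== VERDICT (by name: the statement is the Claim_ definition above) =====
theorem algoritmo_clasificacion_spec : Claim_equal_algoritmo_clasificacion := by
  intro sentence _
  show _ = _
  simp only [algoritmo_clasificacion, algoritmo_clasificacion_alt]
  rw [foldl_score_eq, pvGoB_split sentence.toList [] []]
  simp only [PySem.Str.split₀, cleaned_toList, PySem.Chars.split₀, List.reverse_nil,
    List.map_map, pvS, Function.comp_def, List.map_nil, List.sum_nil, zero_add, sub_zero]
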